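-- pv_equiv track=rewrite | github.com/flxj/ProjectEulerSolutions | p119.py | is_digit_sum_power
-- ===== SOURCE A (Python) =====
-- def is_digit_sum_power(x):
--     digitsum = sum(int(c) for c in str(x))
--     if digitsum == 1:# Powers of 10 are never a power of 1
--         return False
--     pow = digitsum
--     while pow < x:
--         pow *= digitsum
--     return pow == x
-- ===== SOURCE B (Python) =====
-- def is_digit_sum_power(x):
--     d = sum(int(c) for c in str(x))
--     if d == 1:  # powers of 10 are never a power of 1
--         return False
--     if d == 0:  # only x == 0 has digit sum 0
--         return True
--     while x > d and x % d == 0: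
--         x //= d
--     return x == d
-- ===== Notes on version B (the rewrite author's own statement) =====
-- stated objective: alternative
-- what changed: Instead of multiplying the digit sum up until the product reaches x, B repeatedly divides x down by the digit sum while it divides evenly and checks the remainder equals the digit sum (with a d==0 guard returning True for x==0, whose loop A never enters).
import Mathlib
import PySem

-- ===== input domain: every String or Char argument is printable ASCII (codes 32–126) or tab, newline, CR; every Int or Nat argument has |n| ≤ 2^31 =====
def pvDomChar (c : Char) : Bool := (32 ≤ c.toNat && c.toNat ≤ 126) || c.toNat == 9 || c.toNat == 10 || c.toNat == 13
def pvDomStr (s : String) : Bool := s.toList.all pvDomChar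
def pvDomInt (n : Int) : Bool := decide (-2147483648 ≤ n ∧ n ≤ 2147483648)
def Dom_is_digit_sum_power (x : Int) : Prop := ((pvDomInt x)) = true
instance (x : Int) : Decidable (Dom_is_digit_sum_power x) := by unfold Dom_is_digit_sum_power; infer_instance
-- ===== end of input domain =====

-- B replaces A's grow-a-power loop (pow *= digitsum until pow ≥ x) by dividing x down by the
-- digit sum while it divides evenly (alternative decomposition, same cost).

-- ===== PORT A =====
-- int(c) for a single character c; the .getD 0 default is only reached where Python raises
-- ValueError (the '-' sign character of str(x) for x < 0, excluded by Pre_).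
def pyCharVal (c : Char) : Int := (PySem.Int.ofChars? [c]).getD 0

-- digitsum = sum(int(c) for c in str(x)) — this line is identical in both Pythons, so the
-- helper is shared by both ports.
def pyDigitSum (x : Int) : Int := ((PySem.Int.toChars x).map pyCharVal).sum

-- while pow < x: pow *= digitsum.  The inner guard only makes the loop total: where it is
-- false (pow does not grow) the Python loop diverges, which Pre_ inputs never reach.
def aLoop (digitsum x pow : Int) : Int :=
  if _h : pow < x then
    if _hlt : pow < pow * digitsum then aLoop digitsum x (pow * digitsum) else pow
  else pow
termination_by (x - pow).toNat
decreasing_by omega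

def is_digit_sum_power (x : Int) : Bool :=
  let digitsum := pyDigitSum x
  if digitsum == 1 then false
  else aLoop digitsum x digitsum == x

-- ===== PORT B =====
-- while x > d and x % d == 0: x //= d.  The inner guard only makes the loop total; it is
-- unreachable for the d ≥ 2 this is called with.
def bLoop (d x : Int) : Int :=
  if _h : d < x ∧ PySem.Int.mod x d = 0 then
    if _hlt : (PySem.Int.floordiv x d).toNat < x.toNat then bLoop d (PySem.Int.floordiv x d)
    else x
  else x
termination_by x.toNat
decreasing_by exact _hlt

def is_digit_sum_power_alt (x : Int) : Bool :=
  let d := pyDigitSum x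
  if d == 1 then false
  else if d == 0 then true
  else bLoop d x == d

-- ===== PRECONDITION & SPEC =====
-- Pre_ excludes exactly x < 0, on which BOTH Pythons raise ValueError
-- (int('-') on the sign character of str(x)).
def Pre_is_digit_sum_power (x : Int) : Prop := 0 ≤ x
instance (x : Int) : Decidable (Pre_is_digit_sum_power x) := by unfold Pre_is_digit_sum_power; infer_instance
def pvWitness_is_digit_sum_power : Int := 81

def Spec_is_digit_sum_power (x : Int) (out : Bool) : Prop := out = is_digit_sum_power_alt x
instance (x : Int) (out : Bool) : Decidable (Spec_is_digit_sum_power x out) := by unfold Spec_is_digit_sum_power; infer_instance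

-- ===== CLAIM (what is proved, stated in full; the proofs are below) =====
def Claim_equal_is_digit_sum_power : Prop := ∀ (x : Int), Dom_is_digit_sum_power x → Pre_is_digit_sum_power x → Spec_is_digit_sum_power x (is_digit_sum_power x)

-- ===== LEMMAS AND PROOFS =====

lemma pyCharVal_digitChar (r : Nat) (h : r < 10) : pyCharVal (Nat.digitChar r) = (r : Int) := by
  interval_cases r <;> decide

lemma toDigitsCore_sum (fuel : Nat) : ∀ (n : Nat) (acc : List Char), n < fuel →
    ((Nat.toDigitsCore 10 fuel n acc).map pyCharVal).sum
      = ((Nat.digits 10 n).sum : Int) + (acc.map pyCharVal).sum := by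
  induction fuel with
  | zero => intro n acc h; omega
  | succ fuel ih =>
    intro n acc h
    rw [Nat.toDigitsCore]
    by_cases h0 : n / 10 = 0
    · rw [if_pos h0]
      have hn : n < 10 := by omega
      simp only [List.map_cons, List.sum_cons, pyCharVal_digitChar _ (Nat.mod_lt _ (by norm_num))]
      rcases Nat.eq_zero_or_pos n with hz | hp
      · subst hz; simp
      · rw [Nat.digits_def' (by norm_num : (1:Nat) < 10) hp, h0]
        simp [Nat.mod_eq_of_lt hn]
    · rw [if_neg h0]
      have hp : 0 < n := by omega
      have hlt : n / 10 < fuel :=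
        lt_of_lt_of_le (Nat.div_lt_self hp (by norm_num)) (by omega)
      rw [ih (n / 10) _ hlt]
      rw [Nat.digits_def' (by norm_num : (1:Nat) < 10) hp]
      simp only [List.map_cons, List.sum_cons,
        pyCharVal_digitChar _ (Nat.mod_lt _ (by norm_num))]
      push_cast
      ring

lemma pyDigitSum_eq (x : Int) (hx : 0 ≤ x) :
    pyDigitSum x = ((Nat.digits 10 x.toNat).sum : Int) := by
  unfold pyDigitSum PySem.Int.toChars
  rw [if_neg (by omega)]
  unfold Nat.toDigits
  rw [toDigitsCore_sum _ _ _ (Nat.lt_succ_self _)]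
  simp

lemma digits_sum_pos (n : Nat) (h : n ≠ 0) : 0 < (Nat.digits 10 n).sum := by
  induction n using Nat.strong_induction_on with
  | _ n ih =>
    rw [Nat.digits_def' (by norm_num : (1:Nat) < 10) (Nat.pos_of_ne_zero h)]
    simp only [List.sum_cons]
    by_cases h10 : n % 10 = 0
    · have hd : n / 10 ≠ 0 := by omega
      have := ih (n / 10) (Nat.div_lt_self (Nat.pos_of_ne_zero h) (by norm_num)) hd
      omega
    · omega

lemma aLoop_eq_iff (d x pow : Int) (hd : 2 ≤ d) (hp : 1 ≤ pow) :
    aLoop d x pow = x ↔ ∃ j : Nat, pow * d ^ j = x := by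
  by_cases h : pow < x
  · have hmul : pow < pow * d := by nlinarith
    rw [aLoop, dif_pos h, dif_pos hmul, aLoop_eq_iff d x (pow * d) hd (by nlinarith)]
    constructor
    · rintro ⟨j, hj⟩; exact ⟨j + 1, by rw [← hj, pow_succ']; ring⟩
    · rintro ⟨j, hj⟩
      cases j with
      | zero => exfalso; simp at hj; omega
      | succ j => exact ⟨j, by rw [← hj, pow_succ']; ring⟩
  · rw [aLoop, dif_neg h]
    constructor
    · intro he; exact ⟨0, by simp [he]⟩
    · rintro ⟨j, hj⟩
      cases j with
      | zero => simpa using hj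
      | succ j =>
        exfalso
        have h1 : d ^ 1 ≤ d ^ (j + 1) := pow_le_pow_right₀ (by omega) (by omega)
        rw [pow_one] at h1
        nlinarith
termination_by (x - pow).toNat
decreasing_by omega

lemma bLoop_eq_iff (d x : Int) (hd : 2 ≤ d) :
    bLoop d x = d ↔ ∃ k : Nat, x = d ^ (k + 1) := by
  by_cases h : d < x ∧ PySem.Int.mod x d = 0
  · obtain ⟨hlt', hmod⟩ := h
    obtain ⟨c, hc⟩ := (PySem.Int.mod_eq_zero_iff_dvd x d).mp hmod
    have hfd : PySem.Int.floordiv x d = c := by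
      rw [PySem.Int.floordiv_eq_ediv_of_pos (by omega), hc,
        Int.mul_ediv_cancel_left c (by omega)]
    have hc1 : 1 ≤ c := by nlinarith
    have hguard : (PySem.Int.floordiv x d).toNat < x.toNat := by
      rw [hfd]; have : c < x := by nlinarith
      omega
    rw [bLoop, dif_pos ⟨hlt', hmod⟩, dif_pos hguard, hfd, bLoop_eq_iff d c hd]
    constructor
    · rintro ⟨k, hk⟩; exact ⟨k + 1, by rw [hc, hk]; ring⟩
    · rintro ⟨k, hk⟩
      cases k with
      | zero => exfalso; simp at hk; omega
      | succ k =>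
        refine ⟨k, Int.eq_of_mul_eq_mul_left (show d ≠ 0 by omega) ?_⟩
        rw [← hc, hk]; ring
  · rw [bLoop, dif_neg h]
    push Not at h
    constructor
    · intro he; exact ⟨0, by simp [he]⟩
    · rintro ⟨k, hk⟩
      cases k with
      | zero => simp at hk; omega
      | succ k =>
        exfalso
        have h1 : d ^ 1 ≤ d ^ (k + 1) := pow_le_pow_right₀ (by omega) (by omega)
        rw [pow_one] at h1
        have hgt : d < x := by rw [hk, pow_succ']; nlinarith
        exact h hgt ((PySem.Int.mod_eq_zero_iff_dvd x d).mpr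
          ⟨d ^ (k + 1), by rw [hk, pow_succ']⟩)
termination_by x.toNat
decreasing_by omega

-- ===== VERDICT (by name: the statement is the Claim_ definition above) =====
theorem is_digit_sum_power_spec : Claim_equal_is_digit_sum_power := by
  intro x _ hpre
  unfold Spec_is_digit_sum_power
  by_cases hx0 : x = 0
  · subst hx0
    have hd0 : pyDigitSum 0 = 0 := by decide
    simp only [is_digit_sum_power, is_digit_sum_power_alt, hd0]
    rw [aLoop]
    norm_num
  · have hx : (0:Int) ≤ x := hpre
    have hds := pyDigitSum_eq x hx
    have hpos : 0 < (Nat.digits 10 x.toNat).sum :=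
      digits_sum_pos x.toNat (by omega)
    have hd1 : 1 ≤ pyDigitSum x := by rw [hds]; exact_mod_cast hpos
    simp only [is_digit_sum_power, is_digit_sum_power_alt]
    by_cases h1 : pyDigitSum x = 1
    · simp [h1]
    · have hd2 : 2 ≤ pyDigitSum x := by omega
      rw [if_neg (by simpa using h1), if_neg (by simpa using h1),
        if_neg (by simp; omega)]
      have hA := aLoop_eq_iff (pyDigitSum x) x (pyDigitSum x) hd2 (by omega)
      have hB := bLoop_eq_iff (pyDigitSum x) x hd2
      rw [Bool.eq_iff_iff]
      simp only [beq_iff_eq]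
      rw [hA, hB]
      constructor
      · rintro ⟨j, hj⟩; exact ⟨j, by rw [pow_succ']; exact hj.symm⟩
      · rintro ⟨k, hk⟩; exact ⟨k, by rw [← pow_succ']; exact hk.symm⟩
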